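-- pv_equiv track=rewrite | github.com/nistring/DNA-embedding | test/valid.py | orf_lengths
-- ===== SOURCE A (Python) =====
-- def orf_lengths(s):
--     """Calculate ORF lengths in 3 frames"""
--     stops = {"TAA", "TAG", "TGA"}
--     lens = []
--     for frame in range(3):
--         l = 0
--         for i in range(frame, len(s)-2, 3):
--             codon = s[i:i+3]
--             if codon in stops:
--                 lens.append(l)
--                 l = 0
--             else:
--                 l += 1
--         lens.append(l)
--     return lens
-- ===== SOURCE B (Python) =====
-- def orf_lengths(s):
--     """Calculate ORF lengths in 3 frames"""
--     stops = {"TAA", "TAG", "TGA"}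
--     lens = []
--     n = len(s)
--     for frame in range(3):
--         starts = list(range(frame, n - 2, 3))
--         total = len(starts)
--         stop_idx = [j for j, i in enumerate(starts) if s[i:i+3] in stops]
--         if not stop_idx:
--             lens.append(total)
--         else:
--             first, *rest = stop_idx
--             lens.append(first)
--             prev = first
--             for j in rest:
--                 lens.append(j - prev - 1)
--                 prev = j
--             lens.append(total - 1 - prev)
--     return lens
-- ===== Notes on version B (the rewrite author's own statement) =====
-- stated objective: alternative
-- what changed: Instead of A's per-codon running counter that resets at each stop, B collects per frame the indices of the stop codons (one comprehension over enumerate) and derives every segment length arithmetically from the gaps between consecutive stop positions (first stop index, next-prev-1, total-1-last).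
import Mathlib
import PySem

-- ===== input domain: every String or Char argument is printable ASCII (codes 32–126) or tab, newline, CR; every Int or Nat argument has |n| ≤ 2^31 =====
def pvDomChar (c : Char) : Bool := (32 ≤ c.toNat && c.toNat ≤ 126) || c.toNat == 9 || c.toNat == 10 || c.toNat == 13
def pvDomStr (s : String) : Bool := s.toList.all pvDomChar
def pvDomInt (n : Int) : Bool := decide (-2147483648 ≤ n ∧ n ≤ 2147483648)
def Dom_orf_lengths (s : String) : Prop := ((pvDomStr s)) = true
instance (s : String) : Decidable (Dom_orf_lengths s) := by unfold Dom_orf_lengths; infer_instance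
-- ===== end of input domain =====

-- B replaces A's running-counter scan by collecting stop-codon positions per frame and
-- deriving the segment lengths from the gaps between consecutive stops (objective: alternative).

-- the stop-codon set, shared literal of both sources
def pvStops : List String := ["TAA", "TAG", "TGA"]

-- ===== PORT A =====
-- inner loop body: append current length at a stop and reset, else increment
def pvAStep (s : String) (p : List Int × Int) (i : Int) : List Int × Int :=
  if pvStops.contains (PySem.Str.slice s (some i) (some (i + 3))) then
    (p.1 ++ [p.2], 0)
  else
    (p.1, p.2 + 1)

-- one frame of A: scan the codon starts, then append the trailing length
def pvAFrame (s : String) (lens : List Int) (frame : Int) : List Int :=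
  let st := (PySem.List.pyRange frame (PySem.Str.len s - 2) 3).foldl (pvAStep s) (lens, 0)
  st.1 ++ [st.2]

def orf_lengths (s : String) : List Int :=
  (PySem.List.pyRange 0 3 1).foldl (pvAFrame s) []

-- ===== PORT B =====
-- the loop over `rest`: append gap to previous stop, remember previous stop
def pvBStep (p : List Int × Int) (j : Int) : List Int × Int :=
  (p.1 ++ [j - p.2 - 1], j)

-- one frame of B: positions of stops among the codons, then lengths from the gaps
def pvBFrame (s : String) (lens : List Int) (frame : Int) : List Int :=
  let starts := PySem.List.pyRange frame (PySem.Str.len s - 2) 3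
  let total : Int := starts.length
  let stop_idx := ((PySem.List.enumerate starts).filter
      (fun ji => pvStops.contains (PySem.Str.slice s (some ji.2) (some (ji.2 + 3))))).map (·.1)
  match stop_idx with
  | [] => lens ++ [total]
  | first :: rest =>
    let st := rest.foldl pvBStep (lens ++ [first], first)
    st.1 ++ [total - 1 - st.2]

def orf_lengths_alt (s : String) : List Int :=
  (PySem.List.pyRange 0 3 1).foldl (pvBFrame s) []

-- ===== PRECONDITION & SPEC =====
def Spec_orf_lengths (s : String) (out : List Int) : Prop := out = orf_lengths_alt s
instance (s : String) (out : List Int) : Decidable (Spec_orf_lengths s out) := by unfold Spec_orf_lengths; infer_instance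

-- ===== CLAIM (what is proved, stated in full; the proofs are below) =====
def Claim_equal_orf_lengths : Prop := ∀ (s : String), Dom_orf_lengths s → Spec_orf_lengths s (orf_lengths s)

-- ===== LEMMAS AND PROOFS =====

-- segment lengths of a codon-flag scan, A's shape, abstracted over the stop test
def pvSegs (f : Int → Bool) : List Int → Int → List Int
  | [], l => [l]
  | i :: t, l => if f i then l :: pvSegs f t 0 else pvSegs f t (l + 1)

-- positions (relative to k) of stops among `starts`, B's comprehension, abstracted
def pvSidx (f : Int → Bool) : List Int → Int → List Int
  | [], _ => []
  | i :: t, k => if f i then k :: pvSidx f t (k + 1) else pvSidx f t (k + 1)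

-- gap lengths between consecutive stop positions
def pvGaps : Int → List Int → List Int
  | _, [] => []
  | prev, j :: r => (j - prev - 1) :: pvGaps j r

-- last stop position
def pvLastP : Int → List Int → Int
  | prev, [] => prev
  | _, j :: r => pvLastP j r

theorem pvAFold (s : String) (starts : List Int) :
    ∀ (lens : List Int) (l : Int),
      (starts.foldl (pvAStep s) (lens, l)).1 ++ [(starts.foldl (pvAStep s) (lens, l)).2]
        = lens ++ pvSegs (fun i => pvStops.contains (PySem.Str.slice s (some i) (some (i + 3)))) starts l := by
  induction starts with
  | nil => intro lens l; simp [pvSegs]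
  | cons i t ih =>
    intro lens l
    by_cases h : PySem.Str.slice s (some i) (some (i + 3)) ∈ pvStops
    · simp [List.foldl_cons, pvAStep, h, pvSegs, ih]
    · simp [List.foldl_cons, pvAStep, h, pvSegs, ih]

theorem pvBFold (rest : List Int) :
    ∀ (lens : List Int) (prev : Int),
      rest.foldl pvBStep (lens, prev) = (lens ++ pvGaps prev rest, pvLastP prev rest) := by
  induction rest with
  | nil => intro lens prev; simp [pvGaps, pvLastP]
  | cons j r ih =>
    intro lens prev
    simp [List.foldl_cons, pvBStep, pvGaps, pvLastP, ih]

theorem pvSidx_enum (s : String) (starts : List Int) :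
    ∀ (k : Int),
      ((PySem.List.enumerate starts k).filter
          (fun ji => pvStops.contains (PySem.Str.slice s (some ji.2) (some (ji.2 + 3))))).map (·.1)
        = pvSidx (fun i => pvStops.contains (PySem.Str.slice s (some i) (some (i + 3)))) starts k := by
  induction starts with
  | nil => intro k; simp [PySem.List.enumerate_nil, pvSidx]
  | cons i t ih =>
    intro k
    by_cases h : PySem.Str.slice s (some i) (some (i + 3)) ∈ pvStops
    · simp [PySem.List.enumerate_cons, h, pvSidx]
      simpa using ih (k + 1)
    · simp [PySem.List.enumerate_cons, h, pvSidx]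
      simpa using ih (k + 1)

theorem pvSidx_shift (f : Int → Bool) (t : List Int) :
    ∀ (k : Int), pvSidx f t (k + 1) = (pvSidx f t k).map (· + 1) := by
  induction t with
  | nil => intro k; simp [pvSidx]
  | cons i t ih =>
    intro k
    by_cases h : f i <;> simp [pvSidx, h, ih]

theorem pvGaps_shift (r : List Int) :
    ∀ (prev : Int), pvGaps (prev + 1) (r.map (· + 1)) = pvGaps prev r := by
  induction r with
  | nil => intro prev; simp [pvGaps]
  | cons j r ih =>
    intro prev
    simp [pvGaps, ih]

theorem pvLastP_shift (r : List Int) :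
    ∀ (prev : Int), pvLastP (prev + 1) (r.map (· + 1)) = pvLastP prev r + 1 := by
  induction r with
  | nil => intro prev; simp [pvLastP]
  | cons j r ih =>
    intro prev
    simp [pvLastP, ih]

-- the heart: A's running-counter segments equal B's gap-derived segments
theorem pvMain (f : Int → Bool) (starts : List Int) :
    ∀ (l : Int),
      pvSegs f starts l
        = (match pvSidx f starts 0 with
           | [] => [l + (starts.length : Int)]
           | first :: rest =>
             (l + first) :: (pvGaps first rest ++ [(starts.length : Int) - 1 - pvLastP first rest])) := by
  induction starts with
  | nil => intro l; simp [pvSegs, pvSidx]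
  | cons i t ih =>
    intro l
    by_cases h : f i
    · have hs : pvSidx f (i :: t) 0 = 0 :: (pvSidx f t 0).map (· + 1) := by
        have := pvSidx_shift f t 0
        simp [pvSidx, h]
        simpa using this
      rw [show pvSegs f (i :: t) l = l :: pvSegs f t 0 from by simp [pvSegs, h], hs, ih 0]
      cases h0 : pvSidx f t 0 with
      | nil =>
        simp [pvGaps, pvLastP]
      | cons f0 r0 =>
        simp only [List.map_cons, pvGaps, pvGaps_shift, pvLastP]
        have hl := pvLastP_shift r0 f0
        simp [hl]
        ring
    · have hs : pvSidx f (i :: t) 0 = (pvSidx f t 0).map (· + 1) := by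
        have := pvSidx_shift f t 0
        simp [pvSidx, h]
        simpa using this
      rw [show pvSegs f (i :: t) l = pvSegs f t (l + 1) from by simp [pvSegs, h], hs, ih (l + 1)]
      cases h0 : pvSidx f t 0 with
      | nil => simp; ring
      | cons f0 r0 =>
        simp only [List.map_cons, pvGaps_shift]
        have hl := pvLastP_shift r0 f0
        simp [hl]
        constructor
        · ring
        · ring

theorem pvFrame_eq (s : String) (lens : List Int) (frame : Int) :
    pvAFrame s lens frame = pvBFrame s lens frame := by
  set f : Int → Bool := fun i => pvStops.contains (PySem.Str.slice s (some i) (some (i + 3))) with hf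
  set starts := PySem.List.pyRange frame (PySem.Str.len s - 2) 3 with hst
  show (starts.foldl (pvAStep s) (lens, 0)).1 ++ [(starts.foldl (pvAStep s) (lens, 0)).2] = _
  rw [pvAFold s starts lens 0, pvMain f starts 0]
  show _ = (match ((PySem.List.enumerate starts 0).filter
      (fun ji => pvStops.contains (PySem.Str.slice s (some ji.2) (some (ji.2 + 3))))).map (·.1) with
    | [] => lens ++ [(starts.length : Int)]
    | first :: rest =>
      (rest.foldl pvBStep (lens ++ [first], first)).1
        ++ [(starts.length : Int) - 1 - (rest.foldl pvBStep (lens ++ [first], first)).2])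
  rw [pvSidx_enum s starts 0]
  cases h0 : pvSidx f starts 0 with
  | nil => simp
  | cons first rest =>
    simp [pvBFold]

-- ===== VERDICT (by name: the statement is the Claim_ definition above) =====
theorem orf_lengths_spec : Claim_equal_orf_lengths := by
  intro s _
  show orf_lengths s = orf_lengths_alt s
  unfold orf_lengths orf_lengths_alt
  have h : pvAFrame s = pvBFrame s := funext fun lens => funext fun frame => pvFrame_eq s lens frame
  rw [h]
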